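-- pv_equiv track=rewrite | github.com/pocketscientist/prototype | pocketscientist/agents/business_understanding.py | _parse_business_analysis
-- ===== SOURCE A (Python) =====
-- from typing import Dict, Any
--
-- def _parse_business_analysis(response: str, user_context: str) -> Dict[str, Any]:
--     """Parse LLM response into structured business analysis."""
--
--     # Try to extract structured information from the response
--     lines = response.strip().split('\n')
--
--     analysis_type = "exploratory"  # Default
--     analysis_summary = response[:300] + "..." if len(response) > 300 else response
--
--     # Look for key indicators in user context
--     context_lower = user_context.lower()
--     if any(word in context_lower for word in ["predict", "forecast", "estimate"]):
--         analysis_type = "predictive"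
--     elif any(word in context_lower for word in ["why", "cause", "reason", "explain"]):
--         analysis_type = "diagnostic"
--     elif any(word in context_lower for word in ["recommend", "optimize", "should", "best"]):
--         analysis_type = "prescriptive"
--     elif any(word in context_lower for word in ["describe", "summarize", "overview", "interesting"]):
--         analysis_type = "descriptive"
--
--     return {
--         "analysis_type": analysis_type,
--         "analysis_summary": analysis_summary,
--         "success_criteria": f"Provide clear insights that address: {user_context}",
--         "key_questions": f"Questions derived from: {user_context}",
--         "approach": f"Data-driven {analysis_type} analysis approach"
--     }
-- ===== SOURCE B (Python) =====
-- _KEYWORD_PRIORITY = {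
--     "predict": 0, "forecast": 0, "estimate": 0,
--     "why": 1, "cause": 1, "reason": 1, "explain": 1,
--     "recommend": 2, "optimize": 2, "should": 2, "best": 2,
--     "describe": 3, "summarize": 3, "overview": 3, "interesting": 3,
-- }
-- _LABELS = ("predictive", "diagnostic", "prescriptive", "descriptive", "exploratory")
--
--
-- def _parse_business_analysis(response: str, user_context: str):
--     """Single left-to-right scan over the context: at each position, any keyword
--     starting there lowers the running best priority; label = priority's name."""
--     cl = user_context.lower()
--     best = 4  # exploratory
--     for i in range(len(cl)):
--         for kw, p in _KEYWORD_PRIORITY.items():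
--             if p < best and cl.startswith(kw, i):
--                 best = p
--     analysis_type = _LABELS[best]
--     summary = response if len(response) <= 300 else response[:300] + "..."
--     return {
--         "analysis_type": analysis_type,
--         "analysis_summary": summary,
--         "success_criteria": "Provide clear insights that address: " + user_context,
--         "key_questions": "Questions derived from: " + user_context,
--         "approach": "Data-driven " + analysis_type + " analysis approach",
--     }
-- ===== Notes on version B (the rewrite author's own statement) =====
-- stated objective: alternative
-- what changed: Replaces A's four ordered group-wise substring searches ('any(word in context)' per group) by a single left-to-right scan over the lowered context that, at each position, checks a flat keyword->priority dict for keywords starting there and keeps the minimum priority seen (a naive multi-pattern matcher); the label is looked up from a priority-indexed tuple.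
import Mathlib
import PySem

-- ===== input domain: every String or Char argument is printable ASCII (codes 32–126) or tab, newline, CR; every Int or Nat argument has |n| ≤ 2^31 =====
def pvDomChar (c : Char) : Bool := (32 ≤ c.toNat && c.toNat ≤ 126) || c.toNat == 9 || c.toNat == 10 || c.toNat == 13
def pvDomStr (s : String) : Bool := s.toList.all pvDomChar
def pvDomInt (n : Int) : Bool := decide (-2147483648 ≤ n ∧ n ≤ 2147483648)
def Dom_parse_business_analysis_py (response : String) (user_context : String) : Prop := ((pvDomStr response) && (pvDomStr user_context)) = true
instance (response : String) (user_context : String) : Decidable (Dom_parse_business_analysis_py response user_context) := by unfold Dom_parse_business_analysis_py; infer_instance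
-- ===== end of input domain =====

-- B replaces A's four ordered group substring checks by a single left-to-right scan of the
-- lowered context keeping the minimum priority of any keyword starting at each position
-- (alternative decomposition; same return value).

-- ===== PORT A =====
def parse_business_analysis_py (response : String) (user_context : String) : List (String × String) :=
  let _lines := PySem.Str.split? (PySem.Str.strip response) "\n"
  let context_lower := PySem.Str.lower user_context
  let analysis_type : String :=
    if ["predict", "forecast", "estimate"].any (fun w => PySem.Str.isIn w context_lower) then
      "predictive"
    else if ["why", "cause", "reason", "explain"].any (fun w => PySem.Str.isIn w context_lower) then
      "diagnostic"
    else if ["recommend", "optimize", "should", "best"].any (fun w => PySem.Str.isIn w context_lower) then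
      "prescriptive"
    else if ["describe", "summarize", "overview", "interesting"].any (fun w => PySem.Str.isIn w context_lower) then
      "descriptive"
    else "exploratory"
  let analysis_summary : String :=
    if 300 < PySem.Str.len response then PySem.Str.slice response none (some 300) ++ "..." else response
  [("analysis_type", analysis_type),
   ("analysis_summary", analysis_summary),
   ("success_criteria", "Provide clear insights that address: " ++ user_context),
   ("key_questions", "Questions derived from: " ++ user_context),
   ("approach", "Data-driven " ++ analysis_type ++ " analysis approach")]

-- ===== PORT B =====
-- the flat keyword → priority dict of Source B, in insertion order (keywords as char lists)
def pvKwTable : List (List Char × Nat) :=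
  [("predict".toList, 0), ("forecast".toList, 0), ("estimate".toList, 0),
   ("why".toList, 1), ("cause".toList, 1), ("reason".toList, 1), ("explain".toList, 1),
   ("recommend".toList, 2), ("optimize".toList, 2), ("should".toList, 2), ("best".toList, 2),
   ("describe".toList, 3), ("summarize".toList, 3), ("overview".toList, 3), ("interesting".toList, 3)]

def pvLabels : List String := ["predictive", "diagnostic", "prescriptive", "descriptive", "exploratory"]

def parse_business_analysis_py_alt (response : String) (user_context : String) : List (String × String) :=
  let cs : List Char := (PySem.Str.lower user_context).toList
  -- for i in range(len(cl)): for kw, p in _KEYWORD_PRIORITY.items(): if p < best and cl.startswith(kw, i): best = p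
  -- cl.startswith(kw, i) with 0 ≤ i is exactly kw.toList.isPrefixOf (cs.drop i)
  let best : Nat :=
    (List.range cs.length).foldl
      (fun b i =>
        pvKwTable.foldl
          (fun b kp => if kp.2 < b ∧ kp.1.isPrefixOf (cs.drop i) then kp.2 else b) b)
      4
  -- _LABELS[best]: best ≤ 4 always (it only decreases from 4), so the getD default is unreachable
  let analysis_type : String := pvLabels.getD best "exploratory"
  let summary : String :=
    if PySem.Str.len response ≤ 300 then response else PySem.Str.slice response none (some 300) ++ "..."
  [("analysis_type", analysis_type),
   ("analysis_summary", summary),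
   ("success_criteria", "Provide clear insights that address: " ++ user_context),
   ("key_questions", "Questions derived from: " ++ user_context),
   ("approach", "Data-driven " ++ analysis_type ++ " analysis approach")]

-- ===== PRECONDITION & SPEC =====
def Spec_parse_business_analysis_py (response : String) (user_context : String) (out : List (String × String)) : Prop := out = parse_business_analysis_py_alt response user_context
instance (response : String) (user_context : String) (out : List (String × String)) : Decidable (Spec_parse_business_analysis_py response user_context out) := by unfold Spec_parse_business_analysis_py; infer_instance

-- ===== CLAIM (what is proved, stated in full; the proofs are below) =====
def Claim_equal_parse_business_analysis_py : Prop := ∀ (response : String) (user_context : String), Dom_parse_business_analysis_py response user_context → Spec_parse_business_analysis_py response user_context (parse_business_analysis_py response user_context)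

-- ===== LEMMAS AND PROOFS =====

-- the inner dict loop is a running minimum over the priorities of the keywords matching at this position
lemma pv_inner_foldl_min (l : List (List Char × Nat)) (c : List Char × Nat → Bool) (b : Nat) :
    l.foldl (fun b kp => if kp.2 < b ∧ c kp then kp.2 else b) b
      = ((l.filter c).map Prod.snd).foldl min b := by
  induction l generalizing b with
  | nil => rfl
  | cons x t ih =>
    by_cases hc : c x = true
    · by_cases hlt : x.2 < b
      · simp [List.foldl, hc, hlt, ih, Nat.min_eq_right (Nat.le_of_lt hlt)]
      · simp [List.foldl, hc, hlt, ih, Nat.min_eq_left (Nat.le_of_not_lt hlt)]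
    · simp [List.foldl, hc, ih]

-- the outer position loop composes the per-position running minima into one running minimum
lemma pv_outer_foldl_min (idx : List Nat) (L : Nat → List Nat) (b : Nat) :
    idx.foldl (fun b i => (L i).foldl min b) b = (idx.flatMap L).foldl min b := by
  induction idx generalizing b with
  | nil => rfl
  | cons i t ih => simp [List.foldl, List.flatMap_cons, List.foldl_append, ih]

-- a nonempty word is an infix of cs iff it is a prefix at some scanned position
lemma pv_infix_iff_prefix_at (w cs : List Char) (hw : w ≠ []) :
    w <:+: cs ↔ ∃ i < cs.length, w.isPrefixOf (cs.drop i) = true := by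
  constructor
  · rintro ⟨s, t, rfl⟩
    refine ⟨s.length, ?_, ?_⟩
    · have hw' : 0 < w.length := List.length_pos_iff.mpr hw
      simp [List.length_append]; omega
    · rw [List.append_assoc, List.drop_left]
      exact List.isPrefixOf_iff_prefix.mpr ⟨t, rfl⟩
  · rintro ⟨i, _, hp⟩
    have h1 : w <+: cs.drop i := List.isPrefixOf_iff_prefix.mp hp
    exact h1.isInfix.trans (List.drop_suffix i cs).isInfix

-- membership in the flattened hit list = some keyword of that priority occurs in cs
lemma pv_mem_hits (cs : List Char) (q : Nat) :
    q ∈ (List.range cs.length).flatMap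
        (fun i => ((pvKwTable.filter (fun kp => kp.1.isPrefixOf (cs.drop i))).map Prod.snd))
      ↔ ∃ kp ∈ pvKwTable, kp.2 = q ∧ kp.1 <:+: cs := by
  simp only [List.mem_flatMap, List.mem_map, List.mem_filter, List.mem_range]
  constructor
  · rintro ⟨i, hi, kp, ⟨hm, hp⟩, rfl⟩
    exact ⟨kp, hm, rfl, ((List.isPrefixOf_iff_prefix.mp hp).isInfix.trans (List.drop_suffix i cs).isInfix)⟩
  · rintro ⟨kp, hm, rfl, hinf⟩
    have hw : kp.1 ≠ [] := by
      fin_cases hm <;> simp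
    obtain ⟨i, hi, hp⟩ := (pv_infix_iff_prefix_at kp.1 cs hw).mp hinf
    exact ⟨i, hi, kp, ⟨hm, hp⟩, rfl⟩

-- a group test of A, rephrased as "some keyword of the group is an infix"
lemma pv_hit_iff (ws : List String) (cl : String) :
    (ws.any (fun w => PySem.Str.isIn w cl)) = true ↔ ∃ w ∈ ws, w.toList <:+: cl.toList := by
  simp [List.any_eq_true, PySem.Chars.isIn_iff_infix]

-- B's scanned label equals A's if/elif chain label
lemma pv_type_eq (cl : String) :
    pvLabels.getD
      ((List.range cl.toList.length).foldl
        (fun b i =>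
          pvKwTable.foldl
            (fun b kp => if kp.2 < b ∧ kp.1.isPrefixOf (cl.toList.drop i) then kp.2 else b) b)
        4) "exploratory"
    = (if ["predict", "forecast", "estimate"].any (fun w => PySem.Str.isIn w cl) then "predictive"
       else if ["why", "cause", "reason", "explain"].any (fun w => PySem.Str.isIn w cl) then "diagnostic"
       else if ["recommend", "optimize", "should", "best"].any (fun w => PySem.Str.isIn w cl) then "prescriptive"
       else if ["describe", "summarize", "overview", "interesting"].any (fun w => PySem.Str.isIn w cl) then "descriptive"
       else "exploratory") := by
  set cs : List Char := cl.toList with hcs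
  have hbest :
      (List.range cs.length).foldl
        (fun b i =>
          pvKwTable.foldl
            (fun b kp => if kp.2 < b ∧ kp.1.isPrefixOf (cs.drop i) then kp.2 else b) b) 4
      = ((List.range cs.length).flatMap
          (fun i => ((pvKwTable.filter (fun kp => kp.1.isPrefixOf (cs.drop i))).map Prod.snd))).foldl min 4 := by
    rw [← pv_outer_foldl_min]
    exact List.foldl_ext _ _ 4 (fun b i _ =>
      pv_inner_foldl_min pvKwTable (fun kp => kp.1.isPrefixOf (cs.drop i)) b)
  rw [hbest]
  set H : List Nat := (List.range cs.length).flatMap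
      (fun i => ((pvKwTable.filter (fun kp => kp.1.isPrefixOf (cs.drop i))).map Prod.snd)) with hH
  have hmem : ∀ q : Nat, q ∈ H ↔ ∃ kp ∈ pvKwTable, kp.2 = q ∧ kp.1 <:+: cs := fun q => pv_mem_hits cs q
  have h0 : 0 ∈ H ↔ (["predict", "forecast", "estimate"].any (fun w => PySem.Str.isIn w cl)) = true := by
    rw [hmem, pv_hit_iff, ← hcs]; simp [pvKwTable]
  have h1 : 1 ∈ H ↔ (["why", "cause", "reason", "explain"].any (fun w => PySem.Str.isIn w cl)) = true := by
    rw [hmem, pv_hit_iff, ← hcs]; simp [pvKwTable]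
  have h2 : 2 ∈ H ↔ (["recommend", "optimize", "should", "best"].any (fun w => PySem.Str.isIn w cl)) = true := by
    rw [hmem, pv_hit_iff, ← hcs]; simp [pvKwTable]
  have h3 : 3 ∈ H ↔ (["describe", "summarize", "overview", "interesting"].any (fun w => PySem.Str.isIn w cl)) = true := by
    rw [hmem, pv_hit_iff, ← hcs]; simp [pvKwTable]
  have hdom : ∀ q : Nat, q ∈ H → q ≤ 3 := by
    intro q hq
    obtain ⟨kp, hk, hq2, -⟩ := (hmem q).mp hq
    fin_cases hk <;> omega
  obtain ⟨hle4, hley⟩ := PySem.List.foldl_min_le H 4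
  have hmm := PySem.List.foldl_min_mem H 4
  set r : Nat := H.foldl min 4 with hr
  by_cases g0 : (["predict", "forecast", "estimate"].any (fun w => PySem.Str.isIn w cl)) = true
  · have : r = 0 := Nat.le_zero.mp (hley 0 (h0.mpr g0))
    rw [this]; rw [if_pos g0]; rfl
  · by_cases g1 : (["why", "cause", "reason", "explain"].any (fun w => PySem.Str.isIn w cl)) = true
    · have hle : r ≤ 1 := hley 1 (h1.mpr g1)
      have : r = 1 := by
        rcases hmm with h4 | hin
        · omega
        · interval_cases r
          · exact absurd (h0.mp hin) g0
          · rfl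
      rw [this]; rw [if_neg g0, if_pos g1]; rfl
    · by_cases g2 : (["recommend", "optimize", "should", "best"].any (fun w => PySem.Str.isIn w cl)) = true
      · have hle : r ≤ 2 := hley 2 (h2.mpr g2)
        have : r = 2 := by
          rcases hmm with h4 | hin
          · omega
          · interval_cases r
            · exact absurd (h0.mp hin) g0
            · exact absurd (h1.mp hin) g1
            · rfl
        rw [this]; rw [if_neg g0, if_neg g1, if_pos g2]; rfl
      · by_cases g3 : (["describe", "summarize", "overview", "interesting"].any (fun w => PySem.Str.isIn w cl)) = true
        · have hle : r ≤ 3 := hley 3 (h3.mpr g3)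
          have : r = 3 := by
            rcases hmm with h4 | hin
            · omega
            · interval_cases r
              · exact absurd (h0.mp hin) g0
              · exact absurd (h1.mp hin) g1
              · exact absurd (h2.mp hin) g2
              · rfl
          rw [this]; rw [if_neg g0, if_neg g1, if_neg g2, if_pos g3]; rfl
        · have : r = 4 := by
            rcases hmm with h4 | hin
            · exact h4
            · have := hdom r hin
              interval_cases r
              · exact absurd (h0.mp hin) g0
              · exact absurd (h1.mp hin) g1
              · exact absurd (h2.mp hin) g2
              · exact absurd (h3.mp hin) g3
          rw [this]; rw [if_neg g0, if_neg g1, if_neg g2, if_neg g3]; rfl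

-- ===== VERDICT (by name: the statement is the Claim_ definition above) =====
theorem parse_business_analysis_py_spec : Claim_equal_parse_business_analysis_py := by
  intro response user_context _
  unfold Spec_parse_business_analysis_py parse_business_analysis_py parse_business_analysis_py_alt
  have hsum : (if 300 < PySem.Str.len response
        then PySem.Str.slice response none (some 300) ++ "..." else response)
      = (if PySem.Str.len response ≤ 300
        then response else PySem.Str.slice response none (some 300) ++ "...") := by
    split_ifs <;> first | rfl | omega
  simp only [hsum, pv_type_eq]
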